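-- pv_equiv track=rewrite | github.com/MSch1991/BA-Arbeit | preprocessing/my_data/00_dev/tagtog_format_anno.py | group_blocks
-- ===== SOURCE A (Python) =====
-- def group_blocks(tsv_file) -> list:
--     blocks = list()
--     buffer = ""
--     for line in tsv_file:
--         buffer += line
--         if "\t" in line:
--             blocks.append(buffer)
--             buffer = ""
--
--     if buffer != "":
--         blocks.append(buffer)
--
--     return [block.split('\t') for block in blocks]
-- ===== SOURCE B (Python) =====
-- def group_blocks(tsv_file) -> list:
--     lines = list(tsv_file)
--     n = len(lines)
--     blocks = []
--     i = 0
--     while i < n: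
--         j = i
--         while j < n and '\t' not in lines[j]:
--             j += 1
--         if j == n:
--             tail = ''.join(lines[i:])
--             if tail:
--                 blocks.append(tail.split('\t'))
--             i = n
--         else:
--             blocks.append(''.join(lines[i:j + 1]).split('\t'))
--             i = j + 1
--     return blocks
-- ===== Notes on version B (the rewrite author's own statement) =====
-- stated objective: alternative
-- what changed: B scans block-by-block: it advances an index over the run of tab-free lines up to the next tab-bearing line, joins that whole slice and splits it at once, instead of A's line-by-line string buffer accumulation with a separate final split pass.
import Mathlib
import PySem

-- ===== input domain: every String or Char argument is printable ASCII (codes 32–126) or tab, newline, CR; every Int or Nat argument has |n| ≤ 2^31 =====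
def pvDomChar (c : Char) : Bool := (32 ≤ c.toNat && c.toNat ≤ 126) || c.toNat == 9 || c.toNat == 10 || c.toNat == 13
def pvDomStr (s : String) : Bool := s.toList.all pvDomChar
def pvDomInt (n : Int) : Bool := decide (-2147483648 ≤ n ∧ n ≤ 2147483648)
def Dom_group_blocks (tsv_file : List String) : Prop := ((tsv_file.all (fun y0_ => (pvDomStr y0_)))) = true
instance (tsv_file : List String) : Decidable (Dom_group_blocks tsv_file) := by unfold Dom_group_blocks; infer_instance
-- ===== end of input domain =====

-- B scans block-by-block: it advances over the run of tab-free lines up to the next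
-- tab-bearing line, joins that whole slice and splits it at once, instead of A's
-- line-by-line buffer accumulation with a separate final split pass (objective: alternative).

-- ===== PORT A =====
-- A's loop body: buffer += line; if "\t" in line: blocks.append(buffer); buffer = ""
def stepA (st : List String × String) (line : String) : List String × String :=
  let buffer := st.2 ++ line
  if PySem.Str.isIn "\t" line then (st.1 ++ [buffer], "") else (st.1, buffer)

def group_blocks (tsv_file : List String) : List (List String) :=
  let st := tsv_file.foldl stepA ([], "")
  (if st.2 = "" then st.1 else st.1 ++ [st.2]).map
    (fun block => (PySem.Str.split? block "\t").getD [])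

-- ===== PORT B =====
-- block.split('\t') of Source B
def splitTab (s : String) : List String := (PySem.Str.split? s "\t").getD []

-- Source B's outer while loop: each iteration consumes one whole block from the remaining
-- suffix `lines`; the inner `while '\t' not in lines[j]` is the takeWhile/dropWhile pair.
def blocksFrom (lines : List String) : List (List String) :=
  let pre := lines.takeWhile (fun l => !(PySem.Str.isIn "\t" l))
  let rest := lines.dropWhile (fun l => !(PySem.Str.isIn "\t" l))
  if hr : rest = [] then
    -- j == n: tail = ''.join(lines[i:]); append tail.split('\t') unless tail is empty
    let tail := PySem.Str.join "" lines
    if tail = "" then [] else [splitTab tail]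
  else
    -- blocks.append(''.join(lines[i:j+1]).split('\t')); i = j + 1
    splitTab (PySem.Str.join "" (pre ++ [rest.head hr])) :: blocksFrom rest.tail
termination_by lines.length
decreasing_by
  have h1 : (lines.dropWhile (fun l => !(PySem.Str.isIn "\t" l))).length ≤ lines.length :=
    (List.dropWhile_sublist _).length_le
  have h2 : (lines.dropWhile (fun l => !(PySem.Str.isIn "\t" l))).length ≠ 0 := by
    intro hc; exact hr (List.eq_nil_of_length_eq_zero hc)
  simp only [List.length_tail]
  omega

def group_blocks_alt (tsv_file : List String) : List (List String) := blocksFrom tsv_file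

-- ===== PRECONDITION & SPEC =====
def Spec_group_blocks (tsv_file : List String) (out : List (List String)) : Prop := out = group_blocks_alt tsv_file
instance (tsv_file : List String) (out : List (List String)) : Decidable (Spec_group_blocks tsv_file out) := by unfold Spec_group_blocks; infer_instance

-- ===== CLAIM (what is proved, stated in full; the proofs are below) =====
def Claim_equal_group_blocks : Prop := ∀ (tsv_file : List String), Dom_group_blocks tsv_file → Spec_group_blocks tsv_file (group_blocks tsv_file)

-- ===== LEMMAS AND PROOFS =====

-- reference tab-splitter used only in the proofs
def mySplit : List Char → List (List Char)
  | [] => [[]]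
  | c :: rest =>
    if c = '\t' then [] :: mySplit rest
    else match mySplit rest with
      | [] => [[c]]
      | f :: r => (c :: f) :: r

theorem mySplit_ne_nil (l : List Char) : mySplit l ≠ [] := by
  cases l with
  | nil => simp [mySplit]
  | cons c rest =>
    simp only [mySplit]
    split_ifs
    · simp
    · cases h : mySplit rest <;> simp

theorem go_eq (fuel : Nat) : ∀ (l cur : List Char) (acc : List (List Char)), l.length < fuel →
    PySem.Chars.splitOn.go ['\t'] fuel l cur acc =
      acc.reverse ++ (match mySplit l with
        | [] => [cur.reverse]
        | f :: r => (cur.reverse ++ f) :: r) := by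
  induction fuel with
  | zero => intro l cur acc h; omega
  | succ fuel ih =>
    intro l cur acc h
    cases l with
    | nil => simp [PySem.Chars.splitOn.go, mySplit]
    | cons c rest =>
      by_cases hc : c = '\t'
      · subst hc
        rw [PySem.Chars.splitOn.go]
        rw [if_pos (by simp [List.isPrefixOf])]
        show PySem.Chars.splitOn.go ['\t'] fuel rest [] (cur.reverse :: acc) =
          acc.reverse ++ (match mySplit ('\t' :: rest) with
            | [] => [cur.reverse]
            | f :: r => (cur.reverse ++ f) :: r)
        rw [ih rest [] _ (by simp at h; omega)]
        cases hms : mySplit rest with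
        | nil => exact absurd hms (mySplit_ne_nil rest)
        | cons f r => simp [mySplit, hms]
      · rw [PySem.Chars.splitOn.go]
        rw [if_neg (by simp [List.isPrefixOf]; intro h'; exact hc h'.symm),
            ih rest (c :: cur) acc (by simp at h ⊢; omega)]
        simp only [mySplit, if_neg hc]
        cases hms : mySplit rest with
        | nil => exact absurd hms (mySplit_ne_nil rest)
        | cons f r => simp

theorem splitOn_tab (l : List Char) : PySem.Chars.splitOn l ['\t'] = mySplit l := by
  unfold PySem.Chars.splitOn
  rw [go_eq (l.length + 1) l [] [] (by omega)]
  cases h : mySplit l with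
  | nil => exact absurd h (mySplit_ne_nil l)
  | cons f r => simp

-- the splitter both ports use, reduced to mySplit
theorem split_str (s : String) :
    (PySem.Str.split? s "\t").getD [] = (mySplit s.toList).map String.ofList := by
  have h : ("\t" : String).toList = ['\t'] := rfl
  simp [PySem.Str.split?, PySem.Chars.split?, h, List.isEmpty, splitOn_tab]

theorem splitTab_eq (s : String) : splitTab s = (mySplit s.toList).map String.ofList :=
  split_str s

-- splitTab only looks at the character list
theorem splitTab_congr {s t : String} (h : s.toList = t.toList) : splitTab s = splitTab t := by
  rw [splitTab_eq, splitTab_eq, h]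

theorem str_eq_of_toList {s t : String} (h : s.toList = t.toList) : s = t := by
  have := congrArg String.ofList h
  simpa [String.ofList_toList] using this

theorem isIn_tab_iff (s : String) : PySem.Str.isIn "\t" s = true ↔ '\t' ∈ s.toList := by
  rw [PySem.Str.isIn_eq, PySem.Chars.isIn_iff_infix]
  constructor
  · intro hinf
    exact hinf.subset (by simp [show ("\t" : String).toList = ['\t'] from rfl])
  · intro hm
    obtain ⟨t1, t2, ht⟩ := List.append_of_mem hm
    exact ⟨t1, t2, by simp [ht, show ("\t" : String).toList = ['\t'] from rfl]⟩

-- ''.join on the character level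
theorem intercalate_nil_flatten : ∀ (xs : List (List Char)), List.intercalate ([] : List Char) xs = xs.flatten
  | [] => by simp [List.intercalate]
  | [a] => by simp [List.intercalate]
  | a :: b :: t => by
    have ih := intercalate_nil_flatten (b :: t)
    simp [List.intercalate, List.intersperse] at ih ⊢
    simpa using ih

theorem chars_join_flatten (xs : List (List Char)) :
    PySem.Chars.join [] xs = xs.flatten := by
  simp [PySem.Chars.join, intercalate_nil_flatten]

-- "\t".toList, reduced
theorem hts : ("\t" : String).toList = ['\t'] := rfl

-- cons steps of dropWhile/takeWhile under the tab predicate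
theorem dropWhile_tab_free (s : String) (l : List String) (hs : PySem.Str.isIn "\t" s = false) :
    List.dropWhile (fun x => !PySem.Str.isIn "\t" x) (s :: l)
      = List.dropWhile (fun x => !PySem.Str.isIn "\t" x) l := by
  have hs' := hs
  simp only [PySem.Str.isIn_eq, hts] at hs' ⊢
  rw [List.dropWhile_cons]
  simp [hs']

theorem dropWhile_tab_tab (s : String) (l : List String) (hs : PySem.Str.isIn "\t" s = true) :
    List.dropWhile (fun x => !PySem.Str.isIn "\t" x) (s :: l) = s :: l := by
  have hs' := hs
  simp only [PySem.Str.isIn_eq, hts] at hs' ⊢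
  rw [List.dropWhile_cons]
  simp [hs']

theorem takeWhile_tab_free (s : String) (l : List String) (hs : PySem.Str.isIn "\t" s = false) :
    List.takeWhile (fun x => !PySem.Str.isIn "\t" x) (s :: l)
      = s :: List.takeWhile (fun x => !PySem.Str.isIn "\t" x) l := by
  have hs' := hs
  simp only [PySem.Str.isIn_eq, hts] at hs' ⊢
  rw [List.takeWhile_cons]
  simp [hs']

theorem takeWhile_tab_tab (s : String) (l : List String) (hs : PySem.Str.isIn "\t" s = true) :
    List.takeWhile (fun x => !PySem.Str.isIn "\t" x) (s :: l) = [] := by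
  have hs' := hs
  simp only [PySem.Str.isIn_eq, hts] at hs' ⊢
  rw [List.takeWhile_cons]
  simp [hs']

-- appending tab-free strings stays tab-free
theorem isIn_tab_append (s t : String)
    (hs : PySem.Str.isIn "\t" s = false) (ht : PySem.Str.isIn "\t" t = false) :
    PySem.Str.isIn "\t" (s ++ t) = false := by
  rw [Bool.eq_false_iff]
  intro hcon
  have hmem := (isIn_tab_iff _).mp hcon
  simp only [String.toList_append, List.mem_append] at hmem
  rcases hmem with h | h
  · exact absurd ((isIn_tab_iff s).mpr h) (by rw [hs]; simp)
  · exact absurd ((isIn_tab_iff t).mpr h) (by rw [ht]; simp)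

theorem isIn_tab_empty : PySem.Str.isIn "\t" "" = false := by decide

-- unfolding lemmas for blocksFrom, by the value of dropWhile
theorem blocksFrom_of_drop_nil (lines : List String)
    (hd : lines.dropWhile (fun l => !(PySem.Str.isIn "\t" l)) = []) :
    blocksFrom lines =
      if PySem.Str.join "" lines = "" then [] else [splitTab (PySem.Str.join "" lines)] := by
  rw [blocksFrom]
  simp only [hd, dite_true]

theorem blocksFrom_of_drop_cons (lines : List String) (d : String) (rest' : List String)
    (hd : lines.dropWhile (fun l => !(PySem.Str.isIn "\t" l)) = d :: rest') :
    blocksFrom lines =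
      splitTab (PySem.Str.join ""
        (lines.takeWhile (fun l => !(PySem.Str.isIn "\t" l)) ++ [d])) :: blocksFrom rest' := by
  rw [blocksFrom]
  simp only [hd]
  simp

-- a leading empty line is invisible to B
theorem blocksFrom_cons_empty (l : List String) : blocksFrom ("" :: l) = blocksFrom l := by
  cases hd : l.dropWhile (fun x => !(PySem.Str.isIn "\t" x)) with
  | nil =>
    have hd' : ("" :: l).dropWhile (fun x => !(PySem.Str.isIn "\t" x)) = [] := by
      rw [dropWhile_tab_free _ _ isIn_tab_empty, hd]
    rw [blocksFrom_of_drop_nil _ hd, blocksFrom_of_drop_nil _ hd']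
    have hj : PySem.Str.join "" ("" :: l) = PySem.Str.join "" l :=
      str_eq_of_toList (by simp [chars_join_flatten])
    rw [hj]
  | cons d rest' =>
    have hd' : ("" :: l).dropWhile (fun x => !(PySem.Str.isIn "\t" x)) = d :: rest' := by
      rw [dropWhile_tab_free _ _ isIn_tab_empty, hd]
    rw [blocksFrom_of_drop_cons _ _ _ hd, blocksFrom_of_drop_cons _ _ _ hd',
        takeWhile_tab_free _ _ isIn_tab_empty]
    have hj : splitTab (PySem.Str.join "" (("" :: l.takeWhile (fun x => !(PySem.Str.isIn "\t" x))) ++ [d]))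
        = splitTab (PySem.Str.join "" ((l.takeWhile (fun x => !(PySem.Str.isIn "\t" x))) ++ [d])) :=
      splitTab_congr (by simp [chars_join_flatten])
    rw [hj]

-- merging two tab-free leading lines does not change B's result
theorem blocksFrom_merge (s t : String) (l : List String)
    (hs : PySem.Str.isIn "\t" s = false) (ht : PySem.Str.isIn "\t" t = false) :
    blocksFrom (s :: t :: l) = blocksFrom ((s ++ t) :: l) := by
  have hst := isIn_tab_append s t hs ht
  cases hd : l.dropWhile (fun x => !(PySem.Str.isIn "\t" x)) with
  | nil =>
    have h1 : (s :: t :: l).dropWhile (fun x => !(PySem.Str.isIn "\t" x)) = [] := by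
      rw [dropWhile_tab_free _ _ hs, dropWhile_tab_free _ _ ht, hd]
    have h2 : ((s ++ t) :: l).dropWhile (fun x => !(PySem.Str.isIn "\t" x)) = [] := by
      rw [dropWhile_tab_free _ _ hst, hd]
    rw [blocksFrom_of_drop_nil _ h1, blocksFrom_of_drop_nil _ h2]
    have hj : PySem.Str.join "" (s :: t :: l) = PySem.Str.join "" ((s ++ t) :: l) :=
      str_eq_of_toList (by simp [chars_join_flatten])
    rw [hj]
  | cons d rest' =>
    have h1 : (s :: t :: l).dropWhile (fun x => !(PySem.Str.isIn "\t" x)) = d :: rest' := by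
      rw [dropWhile_tab_free _ _ hs, dropWhile_tab_free _ _ ht, hd]
    have h2 : ((s ++ t) :: l).dropWhile (fun x => !(PySem.Str.isIn "\t" x)) = d :: rest' := by
      rw [dropWhile_tab_free _ _ hst, hd]
    rw [blocksFrom_of_drop_cons _ _ _ h1, blocksFrom_of_drop_cons _ _ _ h2,
        takeWhile_tab_free _ _ hs, takeWhile_tab_free _ _ ht, takeWhile_tab_free _ _ hst]
    have hj : splitTab (PySem.Str.join "" ((s :: t :: l.takeWhile (fun x => !(PySem.Str.isIn "\t" x))) ++ [d]))
        = splitTab (PySem.Str.join "" (((s ++ t) :: l.takeWhile (fun x => !(PySem.Str.isIn "\t" x))) ++ [d])) :=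
      splitTab_congr (by simp [chars_join_flatten])
    rw [hj]

-- a tab-free line followed by a tab-bearing one: B emits their concatenation, split
theorem blocksFrom_free_tab (s t : String) (l : List String)
    (hs : PySem.Str.isIn "\t" s = false) (ht : PySem.Str.isIn "\t" t = true) :
    blocksFrom (s :: t :: l) = splitTab (s ++ t) :: blocksFrom l := by
  have h1 : (s :: t :: l).dropWhile (fun x => !(PySem.Str.isIn "\t" x)) = t :: l := by
    rw [dropWhile_tab_free _ _ hs, dropWhile_tab_tab _ _ ht]
  rw [blocksFrom_of_drop_cons _ _ _ h1, takeWhile_tab_free _ _ hs, takeWhile_tab_tab _ _ ht]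
  have hj : splitTab (PySem.Str.join "" ([s] ++ [t])) = splitTab (s ++ t) :=
    splitTab_congr (by simp [chars_join_flatten])
  rw [hj]

-- base case: B on a single tab-free line
theorem blocksFrom_single_free (s : String) (hs : PySem.Str.isIn "\t" s = false) :
    blocksFrom [s] = if s = "" then [] else [splitTab s] := by
  have hd : [s].dropWhile (fun x => !(PySem.Str.isIn "\t" x)) = [] := by
    rw [dropWhile_tab_free _ _ hs]; rfl
  rw [blocksFrom_of_drop_nil _ hd]
  have hj : PySem.Str.join "" [s] = s := str_eq_of_toList (by simp)
  rw [hj]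

-- main invariant: A's fold from (blocks, buf) finishes as blocks (split) ++ B's blocks of (buf :: lines)
theorem fold_main (lines : List String) : ∀ (blocks : List String) (buf : String),
    PySem.Str.isIn "\t" buf = false →
    (let st := lines.foldl stepA (blocks, buf)
     (if st.2 = "" then st.1 else st.1 ++ [st.2]).map splitTab)
      = blocks.map splitTab ++ blocksFrom (buf :: lines) := by
  induction lines with
  | nil =>
    intro blocks buf hbuf
    simp only [List.foldl_nil, blocksFrom_single_free buf hbuf]
    by_cases hb : buf = ""
    · simp [hb]
    · simp [hb]
  | cons line rest ih =>
    intro blocks buf hbuf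
    by_cases ht : PySem.Str.isIn "\t" line = true
    · have hstep : stepA (blocks, buf) line = (blocks ++ [buf ++ line], "") := by
        simp only [stepA]; rw [ht]; simp
      simp only [List.foldl_cons, hstep]
      have h := ih (blocks ++ [buf ++ line]) "" isIn_tab_empty
      simp only at h
      rw [h, blocksFrom_cons_empty, blocksFrom_free_tab buf line rest hbuf ht]
      simp
    · have ht' : PySem.Str.isIn "\t" line = false := by
        cases hcase : PySem.Str.isIn "\t" line
        · rfl
        · exact absurd hcase ht
      have hstep : stepA (blocks, buf) line = (blocks, buf ++ line) := by
        simp only [stepA]; rw [ht']; simp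
      simp only [List.foldl_cons, hstep]
      have h := ih blocks (buf ++ line) (isIn_tab_append _ _ hbuf ht')
      simp only at h
      rw [h, blocksFrom_merge buf line rest hbuf ht']

-- ===== VERDICT (by name: the statement is the Claim_ definition above) =====
theorem group_blocks_spec : Claim_equal_group_blocks := by
  intro tsv _
  unfold Spec_group_blocks group_blocks group_blocks_alt
  have h := fold_main tsv [] "" isIn_tab_empty
  simp only [List.map_nil, List.nil_append, blocksFrom_cons_empty] at h
  exact h
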